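/- GENERATED by mk_final_copies.py from the proof of the farm's unit `imdct_step3_inner_s_loop_ld654.1` (farm:imdct_step3_inner_s_loop_ld654.1.1: Proof.lean) as the
   re-elaboration sweep compiled it — do not edit. -/
import Asan.CheckWalk
import Vorbis.Spec.Units.imdct_step3_inner_s_loop_ld654_1
open X86 X86.User Asan Vorbis Vorbis.Spec

set_option maxRecDepth 4000
set_option maxHeartbeats 4000000

namespace Vorbis.Spec.imdct_step3_inner_s_loop_ld654_1

/-- `sar r32, 3 ; movsxd r64, r32` of a non-negative `int` (0x106975, 0x106979; C line 2615 `a_off = base_n >> 3`): the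
division by 8, as a number. -/
theorem sext_sar3 (x : BitVec 32) (h : x.toNat < 2 ^ 31) :
    (Word.ofBV (BitVec.signExtend 64 (x.sshiftRight 3))).toNat = x.toNat / 8 := by
  have hm : x.msb = false := by
    rw [BitVec.msb_eq_decide]
    simp only [decide_eq_false_iff_not, Nat.not_le]
    omega
  have e : (x.sshiftRight 3).toNat = x.toNat / 8 := by
    rw [BitVec.toNat_sshiftRight_of_msb_false hm, Nat.shiftRight_eq_div_pow]
  rw [toNat_sext32 _ (by rw [e]; omega), e]

/-- `shl r32, 4 ; movsxd r64, r32` of an `int` `n` with `16 n < 2³¹` (0x10699a, 0x10699d; C line 2618 `16 * n`): `16 n`, as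
a number. -/
theorem sext_shl4 (x : BitVec 32) (h : 16 * x.toNat < 2 ^ 31) :
    (Word.ofBV (BitVec.signExtend 64 (x <<< 4))).toNat = 16 * x.toNat := by
  have e : (x <<< 4).toNat = 16 * x.toNat := by
    rw [BitVec.toNat_shiftLeft, Nat.shiftLeft_eq]
    omega
  rw [toNat_sext32 _ (by rw [e]; omega), e]

/-- `shl r64, 2` of a number below `2⁶²` (0x1069a0; the scaling of `16 * n` floats to bytes): the multiplication by 4. -/
theorem shl2 (w : Word) (h : w.toNat < 2 ^ 62) : (w <<< 2).toNat = 4 * w.toNat := by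
  rw [UInt64.toNat_shiftLeft]
  have e2 : (2 : UInt64).toNat % 64 = 2 := rfl
  rw [e2, Nat.shiftLeft_eq]
  omega

end Vorbis.Spec.imdct_step3_inner_s_loop_ld654_1

/-- Segment 1 of `imdct_step3_inner_s_loop_ld654` (the function's entry 0x106960 … the loop head `loop1` = 0x106c47; C lines
2614-2620: six pushes, `sub rsp, 28H`, the checked load of `A2 = A[base_n >> 3]` into the slot `[rsp]`, `z = e + i_off`,
`base = z - 16 * n`, `jmp` to the loop test). The exit assertion `AtHead … 0` is BUILT from the walker's facts. -/
theorem Vorbis.Spec.Worked.imdct_step3_inner_s_loop_ld654_1_ok : Vorbis.Spec.imdct_step3_inner_s_loop_ld654_1.Statement := by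
  intro Lay hLay μ hμ u₀ hcode hload4 others frames len i0 ue ret he hpre
  have he0 := he
  have hpre0 := hpre
  v_entry he
  obtain ⟨hsh, hn31, hi0, hb31, hrun, hlen, hlive, hA⟩ := hpre
  have hsp := hsh.rsp
  -- where the two live ranges are: inside the data space, no wrap-around
  have hwhereE := hlive.where_ hsh.inv hsh.offText (by omega) (by omega)
  have hwhereA := hA.where_ hsh.inv hsh.offText (by omega) (by omega)
  -- the three 32-bit arguments as numbers
  have er8 := imdct_step3_inner_s_loop_ld654_1.sext_sar3 (Word.part .w32 (ue.reg .r8)) (by rw [part32_toNat, ← arg32_def]; exact hb31)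
  rw [part32_toNat, ← arg32_def] at er8
  have hi31 : arg32 ue .rdx < 2 ^ 31 := by omega
  have edx := arg32_sext ue .rdx hi31
  have edi := imdct_step3_inner_s_loop_ld654_1.sext_shl4 (Word.part .w32 (ue.reg .rdi)) (by rw [part32_toNat, ← arg32_def]; exact hn31)
  rw [part32_toNat, ← arg32_def] at edi
  -- the address of A2 = A[base_n >> 3] (0x10697c `lea r13, [rcx + r8*4]`)
  have eA := add_mul4 (ue.reg .rcx) _ _ er8 (by omega)
  u_walk hcode [hμ.vendor] until [Vorbis.L.imdct_step3_inner_s_loop_ld654.loop1] span [Vorbis.L.textLo, Vorbis.L.textHi] side (v_side)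
  case check_106983 =>
    -- 0x106983, C line 2616 `float A2 = A[0+a_off];`: the float is live (the pre), no store so far went to the shadow
    have hun : ShadowUntouched ue.mem s_106983.mem := by v_untouched
    exact hA.accSmall hsh.inv hun _ 4 (by decide) (by omega) (by omega)
  case cont =>
    -- 0x106c47, C line 2620 `while (z > base) {`: the loop head with t = 0
    refine ReachVia.done ⟨w_rip, ?_⟩
    -- z = e + 4 i_off (0x106996 `lea rbx, [r12 + rbx*4]`)
    have ez := add_mul4 (ue.reg .rsi) _ _ edx (by omega)
    -- 64 n' (0x1069a0 `shl rbp, 2`)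
    have e64 := imdct_step3_inner_s_loop_ld654_1.shl2 _ (by rw [edi]; omega)
    rw [edi] at e64
    refine ⟨⟨he0, hpre0, w_eq, ?abi, ⟨w_rsp, ?_, ?_, ?_, ?_, ?_, ?_, ?_⟩, ?same, ?shadow⟩, Nat.zero_le _, ?z, ?base⟩
    case abi => v_inv
    case same =>
      simp only [X86.User.Spec.footprint, vspec]
      u_same
    case shadow => v_untouched
    case z =>
      rw [w_rbx, ez]
      omega
    case base =>
      rw [w_r15, UInt64.toNat_sub_of_le _ _ (by rw [UInt64.le_iff_toNat_le, ez, e64]; omega), ez, e64]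
      omega
    all_goals u_resolve
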